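-- pv_equiv track=rewrite | github.com/sayakpaul/dreambooth-keras | src/datasets.py | _collate_instance_image_paths
-- ===== SOURCE A (Python) =====
-- from typing import Callable, Dict, List, Tuple
--
-- def _collate_instance_image_paths(
--     instance_image_paths: List[str], class_image_paths: List[str]
-- ) -> List:
--     """Makes `instance_image_paths`'s length equal to the length of `class_image_paths`."""
--     new_instance_image_paths = []
--     for index in range(len(class_image_paths)):
--         instance_image = instance_image_paths[index % len(instance_image_paths)]
--         new_instance_image_paths.append(instance_image)
--
--     return new_instance_image_paths
-- ===== SOURCE B (Python) =====
-- def _collate_instance_image_paths(instance_image_paths, class_image_paths):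
--     """Makes `instance_image_paths`'s length equal to the length of `class_image_paths`."""
--     if not class_image_paths:
--         return []
--     q = len(class_image_paths) // len(instance_image_paths) + 1
--     return (instance_image_paths * q)[: len(class_image_paths)]
-- ===== Notes on version B (the rewrite author's own statement) =====
-- stated objective: simpler
-- what changed: Replaces the per-index modulo-lookup append loop with a closed-form replicate-and-slice: (instance * q)[:len(class)] after an empty-class guard.
import Mathlib
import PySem

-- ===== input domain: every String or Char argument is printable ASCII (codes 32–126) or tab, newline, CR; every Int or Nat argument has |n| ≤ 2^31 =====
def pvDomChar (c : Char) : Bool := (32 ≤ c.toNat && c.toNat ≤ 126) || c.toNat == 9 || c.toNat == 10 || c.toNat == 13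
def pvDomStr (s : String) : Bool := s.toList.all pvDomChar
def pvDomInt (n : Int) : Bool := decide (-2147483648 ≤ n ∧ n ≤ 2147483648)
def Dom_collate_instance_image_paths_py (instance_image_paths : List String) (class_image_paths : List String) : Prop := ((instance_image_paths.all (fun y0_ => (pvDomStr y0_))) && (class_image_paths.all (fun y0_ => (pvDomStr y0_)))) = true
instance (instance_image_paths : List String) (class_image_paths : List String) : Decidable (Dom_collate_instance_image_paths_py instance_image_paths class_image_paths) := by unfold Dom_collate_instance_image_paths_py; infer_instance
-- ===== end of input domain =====

-- B replaces A's per-index modulo-lookup loop with a bulk replicate-and-slice construction (objective: simpler).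

-- ===== PORT A =====
-- for index in range(len(class_image_paths)): new.append(instance_image_paths[index % len(instance_image_paths)])
-- (inside Pre_ the modulo index is always in range, so pyGetD's default is never read)
def collate_instance_image_paths_py (instance_image_paths : List String) (class_image_paths : List String) : List String :=
  (PySem.List.pyRange 0 (class_image_paths.length : Int) 1).foldl
    (fun acc index =>
      acc ++ [PySem.List.pyGetD instance_image_paths
        (PySem.Int.mod index (instance_image_paths.length : Int)) ""]) []

-- ===== PORT B =====
-- if not class: []; else (instance * (len(class) // len(instance) + 1))[:len(class)]
def collate_instance_image_paths_py_alt (instance_image_paths : List String) (class_image_paths : List String) : List String :=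
  if class_image_paths = [] then []
  else
    let q := PySem.Int.floordiv (class_image_paths.length : Int) (instance_image_paths.length : Int) + 1
    PySem.List.slice (PySem.List.pyRepeat instance_image_paths q) none (some (class_image_paths.length : Int))

-- ===== PRECONDITION & SPEC =====
-- Pre_ excludes exactly the inputs where Python raises ZeroDivisionError (in A: 'index % 0';
-- in B: the '//' by zero): an empty instance_image_paths with a non-empty class_image_paths.
def Pre_collate_instance_image_paths_py (instance_image_paths : List String) (class_image_paths : List String) : Prop :=
  instance_image_paths ≠ [] ∨ class_image_paths = []
instance (instance_image_paths : List String) (class_image_paths : List String) : Decidable (Pre_collate_instance_image_paths_py instance_image_paths class_image_paths) := by unfold Pre_collate_instance_image_paths_py; infer_instance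

def pvWitness_collate_instance_image_paths_py : List String × List String := (["a", "b"], ["x", "y", "z"])

def Spec_collate_instance_image_paths_py (instance_image_paths : List String) (class_image_paths : List String) (out : List String) : Prop := out = collate_instance_image_paths_py_alt instance_image_paths class_image_paths
instance (instance_image_paths : List String) (class_image_paths : List String) (out : List String) : Decidable (Spec_collate_instance_image_paths_py instance_image_paths class_image_paths out) := by unfold Spec_collate_instance_image_paths_py; infer_instance

-- ===== CLAIM (what is proved, stated in full; the proofs are below) =====
def Claim_equal_collate_instance_image_paths_py : Prop := ∀ (instance_image_paths : List String) (class_image_paths : List String), Dom_collate_instance_image_paths_py instance_image_paths class_image_paths → Pre_collate_instance_image_paths_py instance_image_paths class_image_paths → Spec_collate_instance_image_paths_py instance_image_paths class_image_paths (collate_instance_image_paths_py instance_image_paths class_image_paths)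

-- ===== LEMMAS AND PROOFS =====

-- Element i of q concatenated copies of xs is xs[i % len xs], for i in range.
lemma pv_getD_flatten_replicate (xs : List String) (q : Nat) :
    ∀ i : Nat, i < q * xs.length →
      ((List.replicate q xs).flatten).getD i "" = xs.getD (i % xs.length) "" := by
  induction q with
  | zero => intro i hi; omega
  | succ q ih =>
    intro i hi
    rw [List.replicate_succ, List.flatten_cons]
    by_cases h : i < xs.length
    · rw [List.getD_append _ _ _ _ h, Nat.mod_eq_of_lt h]
    · push Not at h
      have hsm : (q + 1) * xs.length = q * xs.length + xs.length := by ring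
      rw [List.getD_append_right _ _ _ _ h]
      rw [ih (i - xs.length) (by omega)]
      rw [Nat.mod_eq_sub_mod h]

-- Taking n elements from enough copies of xs is the cyclic map k ↦ xs[k % len xs].
lemma pv_take_flatten_replicate (xs : List String) (q n : Nat) (h : n ≤ q * xs.length) :
    ((List.replicate q xs).flatten).take n
      = (List.range n).map (fun k => xs.getD (k % xs.length) "") := by
  have hlen : ((List.replicate q xs).flatten).length = q * xs.length := by
    simp [List.length_flatten]
  apply List.ext_getElem
  · simp [hlen, h]
  · intro i h1 h2
    have hi : i < n := by simpa using h2
    have hfl : i < ((List.replicate q xs).flatten).length := by omega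
    have hiq : i < q * xs.length := by rw [hlen] at hfl; exact hfl
    have hL : 0 < xs.length := by
      by_contra hc
      simp [Nat.eq_zero_of_not_pos hc] at hiq
    have hmod : i % xs.length < xs.length := Nat.mod_lt i hL
    rw [List.getElem_take, List.getElem_map, List.getElem_range,
        ← List.getD_eq_getElem _ "" hfl,
        pv_getD_flatten_replicate xs q i hiq,
        List.getD_eq_getElem _ "" hmod]

-- ===== VERDICT (by name: the statement is the Claim_ definition above) =====
theorem collate_instance_image_paths_py_spec : Claim_equal_collate_instance_image_paths_py := by
  intro inst cls _ hpre
  unfold Spec_collate_instance_image_paths_py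
  unfold collate_instance_image_paths_py collate_instance_image_paths_py_alt
  by_cases hc : cls = []
  · subst hc
    simp
  · have hi : inst ≠ [] := hpre.resolve_right hc
    have hL : 0 < inst.length := List.length_pos_iff.mpr hi
    rw [if_neg hc]
    -- A side: loop → map over range
    rw [PySem.List.pyRange_zero_natCast, List.foldl_map,
        PySem.List.foldl_append_singleton_eq_map, List.nil_append]
    simp only [PySem.Int.mod_natCast, PySem.List.pyGetD_natCast]
    -- B side: replicate-and-slice → take of flatten
    have hq : PySem.Int.floordiv (cls.length : Int) (inst.length : Int) + 1
        = ((cls.length / inst.length + 1 : Nat) : Int) := by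
      rw [PySem.Int.floordiv_natCast]; push_cast; ring
    rw [hq]
    simp only [PySem.List.pyRepeat, Int.toNat_natCast, PySem.List.slice_to_natCast]
    rw [pv_take_flatten_replicate]
    have := Nat.div_add_mod cls.length inst.length
    have := Nat.mod_lt cls.length hL
    nlinarith [Nat.div_add_mod cls.length inst.length]
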